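-- pv_equiv track=rewrite | github.com/shaneholloman/basic-memory | src/basic_memory/repository/sqlite_search_repository.py | _needs_quoting
-- ===== SOURCE A (Python) =====
-- def _needs_quoting(term: str) -> bool:
--     """Check if a term needs to be quoted for FTS5 safety.
--
--     Args:
--         term: The term to check
--
--     Returns:
--         True if the term should be quoted
--     """
--     if not term or not term.strip():
--         return False
--
--     # Characters that indicate we should quote (excluding parentheses which are valid syntax)
--     needs_quoting_chars = [
--         " ",
--         ".",
--         ":",
--         ";",
--         ",",
--         "<",
--         ">",
--         "?",
--         "/",
--         "-",
--         "'",
--         '"',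
--         "[",
--         "]",
--         "{",
--         "}",
--         "+",
--         "!",
--         "@",
--         "#",
--         "$",
--         "%",
--         "^",
--         "&",
--         "=",
--         "|",
--         "\\",
--         "~",
--         "`",
--     ]
--
--     return any(c in term for c in needs_quoting_chars)
-- ===== SOURCE B (Python) =====
-- _SPECIAL_CHARS = frozenset(" .:;,<>?/-'\"[]{}+!@#$%^&=|\\~`")
--
--
-- def _needs_quoting(term: str) -> bool:
--     """Check if a term needs to be quoted for FTS5 safety."""
--     if not term or not term.strip():
--         return False
--     return any(c in _SPECIAL_CHARS for c in term)
-- ===== Notes on version B (the rewrite author's own statement) =====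
-- stated objective: idiomatic
-- what changed: B iterates over the characters of the input term testing each against a frozenset of special characters, instead of A's loop over the 29-element special-character list doing a substring scan of term for each.
import Mathlib
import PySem

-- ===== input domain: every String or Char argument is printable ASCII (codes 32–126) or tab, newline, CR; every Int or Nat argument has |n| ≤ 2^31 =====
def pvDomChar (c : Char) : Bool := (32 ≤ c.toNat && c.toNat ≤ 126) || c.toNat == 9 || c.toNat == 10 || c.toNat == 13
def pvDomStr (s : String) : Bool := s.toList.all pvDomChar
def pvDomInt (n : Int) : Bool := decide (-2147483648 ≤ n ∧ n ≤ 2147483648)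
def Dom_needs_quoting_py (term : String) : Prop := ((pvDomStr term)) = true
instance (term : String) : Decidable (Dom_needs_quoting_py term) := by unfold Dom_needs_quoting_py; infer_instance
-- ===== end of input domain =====

-- B transposes the nested search: it walks the characters of term once, testing each
-- against a set of the special characters, instead of scanning term once per special character.

-- ===== PORT A =====
-- A's list literal of special characters
def pvNeedsQuotingChars : List Char :=
  [' ', '.', ':', ';', ',', '<', '>', '?', '/', '-', '\'', '"', '[', ']', '{', '}',
   '+', '!', '@', '#', '$', '%', '^', '&', '=', '|', '\\', '~', '`']

def needs_quoting_py (term : String) : Bool :=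
  if term.toList.isEmpty || (PySem.Chars.strip term.toList).isEmpty then false
  else pvNeedsQuotingChars.any (fun c => PySem.Chars.isIn [c] term.toList)

-- ===== PORT B =====
-- B's frozenset of special characters
def pvSpecialSet : PySem.Set Char :=
  PySem.Set.ofList " .:;,<>?/-'\"[]{}+!@#$%^&=|\\~`".toList

def needs_quoting_py_alt (term : String) : Bool :=
  if term.toList.isEmpty || (PySem.Chars.strip term.toList).isEmpty then false
  else term.toList.any (fun c => pvSpecialSet.contains c)

-- ===== PRECONDITION & SPEC =====
def Spec_needs_quoting_py (term : String) (out : Bool) : Prop := out = needs_quoting_py_alt term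
instance (term : String) (out : Bool) : Decidable (Spec_needs_quoting_py term out) := by unfold Spec_needs_quoting_py; infer_instance

-- ===== CLAIM (what is proved, stated in full; the proofs are below) =====
def Claim_equal_needs_quoting_py : Prop := ∀ (term : String), Dom_needs_quoting_py term → Spec_needs_quoting_py term (needs_quoting_py term)

-- ===== LEMMAS AND PROOFS =====

-- a one-character substring test is character membership
theorem isIn_singleton_iff_mem (c : Char) (l : List Char) :
    PySem.Chars.isIn [c] l = true ↔ c ∈ l := by
  rw [PySem.Chars.isIn_iff_infix]
  constructor
  · intro h; exact h.subset (List.mem_singleton_self c)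
  · intro h
    obtain ⟨s, t, rfl⟩ := List.mem_iff_append.mp h
    exact ⟨s, t, by simp⟩

theorem specialSet_eq : pvSpecialSet = pvNeedsQuotingChars := by decide

theorem mem_specialSet_iff (c : Char) :
    pvSpecialSet.contains c = true ↔ c ∈ pvNeedsQuotingChars := by
  rw [specialSet_eq]
  exact List.contains_iff_mem

-- the transposed scans agree
theorem any_transpose (l : List Char) :
    pvNeedsQuotingChars.any (fun c => PySem.Chars.isIn [c] l)
      = l.any (fun c => pvSpecialSet.contains c) := by
  apply Bool.eq_iff_iff.mpr
  simp only [List.any_eq_true, isIn_singleton_iff_mem, mem_specialSet_iff]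
  exact ⟨fun ⟨c, h1, h2⟩ => ⟨c, h2, h1⟩, fun ⟨c, h1, h2⟩ => ⟨c, h2, h1⟩⟩

-- ===== VERDICT (by name: the statement is the Claim_ definition above) =====
theorem needs_quoting_py_spec : Claim_equal_needs_quoting_py := by
  intro term _
  unfold Spec_needs_quoting_py needs_quoting_py needs_quoting_py_alt
  split
  · rfl
  · exact any_transpose term.toList
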